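-- pv_equiv track=rewrite | github.com/kimgun95/my-study-log | Weekly_Challenge/01_부족한금액계산하기.py | solution
-- ===== SOURCE A (Python) =====
-- def solution(price, money, count):
--     total = 0
--     for i in range(count):
--         total += (i + 1) * price
--     answer = money - total
--     if answer >= 0:
--         return 0
--     return -answer
-- ===== SOURCE B (Python) =====
-- def solution(price, money, count):
--     n = max(count, 0)
--     total = price * n * (n + 1) // 2
--     return max(total - money, 0)
-- ===== Notes on version B (the rewrite author's own statement) =====
-- stated objective: faster
-- what changed: Replaces the O(count) accumulation loop with the closed-form triangular-number sum price*n*(n+1)//2 and a max instead of the branch.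
import Mathlib
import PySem

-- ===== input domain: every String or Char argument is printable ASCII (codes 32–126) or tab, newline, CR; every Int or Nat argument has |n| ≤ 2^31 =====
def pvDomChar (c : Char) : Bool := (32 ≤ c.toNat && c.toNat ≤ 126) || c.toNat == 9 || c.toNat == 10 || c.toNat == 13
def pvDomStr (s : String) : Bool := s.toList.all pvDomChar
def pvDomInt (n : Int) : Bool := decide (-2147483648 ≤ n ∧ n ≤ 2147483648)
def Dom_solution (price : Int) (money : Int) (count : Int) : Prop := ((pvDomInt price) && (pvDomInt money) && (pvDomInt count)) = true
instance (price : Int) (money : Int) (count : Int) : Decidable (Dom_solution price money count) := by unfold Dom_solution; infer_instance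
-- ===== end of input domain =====

-- B replaces A's O(count) accumulation loop by the closed-form triangular sum price*n*(n+1)//2 (O(1)).

-- ===== PORT A =====
def solution (price : Int) (money : Int) (count : Int) : Int :=
  let total := (PySem.List.pyRange 0 count 1).foldl (fun total i => total + (i + 1) * price) 0
  let answer := money - total
  if answer ≥ 0 then 0 else -answer

-- ===== PORT B =====
def solution_alt (price : Int) (money : Int) (count : Int) : Int :=
  let n := max count 0
  let total := PySem.Int.floordiv (price * n * (n + 1)) 2
  max (total - money) 0

-- ===== PRECONDITION & SPEC =====
def Spec_solution (price : Int) (money : Int) (count : Int) (out : Int) : Prop := out = solution_alt price money count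
instance (price : Int) (money : Int) (count : Int) (out : Int) : Decidable (Spec_solution price money count out) := by unfold Spec_solution; infer_instance

-- ===== CLAIM (what is proved, stated in full; the proofs are below) =====
def Claim_equal_solution : Prop := ∀ (price : Int) (money : Int) (count : Int), Dom_solution price money count → Spec_solution price money count (solution price money count)

-- ===== LEMMAS AND PROOFS =====

-- the loop computes price times the triangular number of n
lemma pv_sum_aux (price : Int) : ∀ (n : Nat) (s : Int),
    (PySem.List.pyRange 0 (n : Int) 1).foldl (fun t i => t + (i + 1) * price) s
      = s + price * n * (n + 1) / 2 := by
  intro n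
  induction n with
  | zero => intro s; simp
  | succ k ih =>
      intro s
      have h : ((k + 1 : Nat) : Int) = (k : Int) + 1 := by push_cast; ring
      rw [h, PySem.List.pyRange_one_succ_right (by positivity), List.foldl_append, ih]
      simp only [List.foldl_cons, List.foldl_nil]
      have hk : ∃ m : Int, (k : Int) * ((k : Int) + 1) = 2 * m := by
        rcases Int.even_mul_succ_self (k : Int) with ⟨m, hm⟩
        exact ⟨m, by omega⟩
      rcases hk with ⟨m, hm⟩
      have h1 : price * (k : Int) * ((k : Int) + 1) = 2 * (price * m) := by
        rw [mul_assoc, hm]; ring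
      have h2 : price * ((k : Int) + 1) * (((k : Int) + 1) + 1) = 2 * (price * (m + (k : Int) + 1)) := by
        have : ((k : Int) + 1) * (((k : Int) + 1) + 1) = 2 * (m + (k : Int) + 1) := by nlinarith [hm]
        rw [mul_assoc, this]; ring
      rw [h1, h2, Int.mul_ediv_cancel_left _ (by norm_num), Int.mul_ediv_cancel_left _ (by norm_num)]
      ring

lemma pv_floordiv_two (a : Int) : PySem.Int.floordiv a 2 = a / 2 :=
  PySem.Int.floordiv_eq_ediv_of_pos (by norm_num)

-- ===== VERDICT (by name: the statement is the Claim_ definition above) =====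
theorem solution_spec : Claim_equal_solution := by
  intro price money count _
  unfold Spec_solution solution solution_alt
  simp only [pv_floordiv_two]
  by_cases hc : 0 ≤ count
  · have hn : ((count.toNat : Nat) : Int) = count := Int.toNat_of_nonneg hc
    have := pv_sum_aux price count.toNat 0
    rw [hn] at this
    rw [this]
    have hmax : max count 0 = count := by omega
    rw [hmax]
    simp only [zero_add]
    split_ifs with h
    · omega
    · omega
  · have hr : PySem.List.pyRange 0 count 1 = [] := by
      rw [PySem.List.pyRange_one]
      simp
      omega
    rw [hr]
    have hmax : max count 0 = 0 := by omega
    rw [hmax]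
    simp only [List.foldl_nil]
    norm_num
    split_ifs with h <;> omega
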